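-- pv_equiv track=rewrite | github.com/Molton321/Estructuras | TallerComplejidadAlgoritmica/problema1.py | maxCGroup
-- ===== SOURCE A (Python) =====
-- def maxCGroup(array):
--     maxsum = 0
--     positions = []
--     for i in range(0, len(array)-1):
--         if (array[i] + array[i+1]) > maxsum:
--             maxsum = array[i] + array[i+1]
--
--             positions = [array[i], array[i+1]]
--     return positions
-- ===== SOURCE B (Python) =====
-- def maxCGroup(array):
--     sums = [array[i] + array[i + 1] for i in range(len(array) - 1)]
--     if not sums:
--         return []
--     m = max(sums)
--     if m <= 0:
--         return []
--     i = sums.index(m)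
--     return [array[i], array[i + 1]]
-- ===== Notes on version B (the rewrite author's own statement) =====
-- stated objective: simpler
-- what changed: Replaces A's single fused scan carrying (running max, best pair) state with a build-the-adjacent-sums-table then max() then index() decomposition with no hand-maintained state.
import Mathlib
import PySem

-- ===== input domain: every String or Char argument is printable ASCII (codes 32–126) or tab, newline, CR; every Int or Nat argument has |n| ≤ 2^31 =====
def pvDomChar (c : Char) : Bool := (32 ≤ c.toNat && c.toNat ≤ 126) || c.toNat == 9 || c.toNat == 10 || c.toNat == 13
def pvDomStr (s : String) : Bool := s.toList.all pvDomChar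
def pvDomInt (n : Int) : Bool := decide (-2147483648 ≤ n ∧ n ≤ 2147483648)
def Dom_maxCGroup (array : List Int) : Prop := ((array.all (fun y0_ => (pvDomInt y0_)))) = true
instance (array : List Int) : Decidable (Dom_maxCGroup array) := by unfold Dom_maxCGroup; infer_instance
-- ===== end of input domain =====

-- B replaces A's fused scan (running max + best pair state) by building the list of adjacent
-- sums, then taking max() and index() of it; same O(n) cost, plainer decomposition.

-- ===== PORT A =====
def maxCGroup (array : List Int) : List Int :=
  ((PySem.List.pyRange 0 ((array.length : Int) - 1) 1).foldl
    (fun (st : Int × List Int) i =>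
      if st.1 < PySem.List.pyGetD array i 0 + PySem.List.pyGetD array (i + 1) 0 then
        (PySem.List.pyGetD array i 0 + PySem.List.pyGetD array (i + 1) 0,
         [PySem.List.pyGetD array i 0, PySem.List.pyGetD array (i + 1) 0])
      else st)
    (0, [])).2

-- ===== PORT B =====
def maxCGroup_alt (array : List Int) : List Int :=
  let sums := (PySem.List.pyRange 0 ((array.length : Int) - 1) 1).map
    (fun i => PySem.List.pyGetD array i 0 + PySem.List.pyGetD array (i + 1) 0)
  match PySem.List.max? sums (fun x => x) with
  | none => []
  | some m =>
    if m ≤ 0 then []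
    else
      match PySem.List.index? sums m with
      | some i => [PySem.List.pyGetD array (i : Int) 0, PySem.List.pyGetD array ((i : Int) + 1) 0]
      | none => []

-- ===== PRECONDITION & SPEC =====
def Spec_maxCGroup (array : List Int) (out : List Int) : Prop := out = maxCGroup_alt array
instance (array : List Int) (out : List Int) : Decidable (Spec_maxCGroup array out) := by unfold Spec_maxCGroup; infer_instance

-- ===== CLAIM (what is proved, stated in full; the proofs are below) =====
def Claim_equal_maxCGroup : Prop := ∀ (array : List Int), Dom_maxCGroup array → Spec_maxCGroup array (maxCGroup array)

-- ===== LEMMAS AND PROOFS =====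

-- A's loop body, on the pair of adjacent elements it reads
def pvStep (st : Int × List Int) (p : Int × Int) : Int × List Int :=
  if st.1 < p.1 + p.2 then (p.1 + p.2, [p.1, p.2]) else st

-- the adjacent sums of a pair list
def pvSums (qs : List (Int × Int)) : List Int := qs.map (fun p => p.1 + p.2)

-- pyGetD at ↑k+1 is getD (k+1)
lemma pv_getD_succ (xs : List Int) (k : Nat) :
    PySem.List.pyGetD xs ((k : Int) + 1) 0 = xs.getD (k + 1) 0 := by
  rw [show ((k : Int) + 1) = ((k + 1 : Nat) : Int) by push_cast; ring,
      PySem.List.pyGetD_natCast]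

-- the indexed adjacent pairs are exactly zip with tail
lemma pv_range_pairs (xs : List Int) :
    (List.range (xs.length - 1)).map (fun k => (xs.getD k 0, xs.getD (k + 1) 0))
      = xs.zip xs.tail := by
  apply List.ext_getElem
  · simp [List.length_zip, List.length_tail]
  · intro i h1 h2
    simp only [List.getElem_map, List.getElem_range, List.getElem_zip, List.getElem_tail]
    simp only [List.length_map, List.length_range] at h1
    rw [List.getD_eq_getElem _ _ (by omega), List.getD_eq_getElem _ _ (by omega)]

lemma pv_toNat (xs : List Int) : ((xs.length : Int) - 1 - 0).toNat = xs.length - 1 := by omega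

-- A's scan is the pvStep fold over the zipped pairs
lemma pv_convA (xs : List Int) :
    maxCGroup xs = ((xs.zip xs.tail).foldl pvStep (0, [])).2 := by
  unfold maxCGroup
  rw [PySem.List.pyRange_one, pv_toNat, List.foldl_map]
  rw [show (fun (st : Int × List Int) (k : Nat) =>
        if st.1 < PySem.List.pyGetD xs (0 + (k : Int)) 0 + PySem.List.pyGetD xs (0 + (k : Int) + 1) 0 then
          (PySem.List.pyGetD xs (0 + (k : Int)) 0 + PySem.List.pyGetD xs (0 + (k : Int) + 1) 0,
           [PySem.List.pyGetD xs (0 + (k : Int)) 0, PySem.List.pyGetD xs (0 + (k : Int) + 1) 0])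
        else st)
      = (fun st k => pvStep st (xs.getD k 0, xs.getD (k + 1) 0)) by
        funext st k; simp [pvStep, pv_getD_succ]]
  rw [← List.foldl_map (f := fun k => (xs.getD k 0, xs.getD (k + 1) 0)) (g := pvStep)]
  rw [pv_range_pairs]

-- B's comprehension builds pvSums of the zipped pairs
lemma pv_convSums (xs : List Int) :
    (PySem.List.pyRange 0 ((xs.length : Int) - 1) 1).map
      (fun i => PySem.List.pyGetD xs i 0 + PySem.List.pyGetD xs (i + 1) 0)
      = pvSums (xs.zip xs.tail) := by
  rw [PySem.List.pyRange_one, pv_toNat, ← pv_range_pairs, List.map_map]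
  unfold pvSums
  rw [List.map_map]
  congr 1
  funext k
  simp [pv_getD_succ]

-- the first component of A's fold is a running max
lemma pv_fold_fst (qs : List (Int × Int)) (c : Int) (pos : List Int) :
    (qs.foldl pvStep (c, pos)).1 = (pvSums qs).foldl max c := by
  induction qs generalizing c pos with
  | nil => rfl
  | cons p t ih =>
    simp only [List.foldl_cons, pvSums, List.map_cons, pvStep]
    split_ifs with h
    · rw [ih]; congr 1; rw [max_def]; split_ifs <;> omega
    · rw [ih (c := c) (pos := pos)]; congr 1; rw [max_def]; split_ifs <;> omega

lemma pv_le_foldl_max (l : List Int) (c : Int) : c ≤ l.foldl max c := by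
  induction l generalizing c with
  | nil => simp
  | cons x t ih => exact le_trans (le_max_left c x) (ih (max c x))

lemma pv_mem_le_foldl_max (l : List Int) : ∀ (c x : Int), x ∈ l → x ≤ l.foldl max c := by
  induction l with
  | nil => intro c x hx; cases hx
  | cons y t ih =>
    intro c x hx
    rcases List.mem_cons.mp hx with h | h
    · subst h; exact le_trans (le_max_right c x) (pv_le_foldl_max t _)
    · exact ih (max c y) x h

lemma pv_foldl_max_le (l : List Int) : ∀ (c b : Int), c ≤ b → (∀ x ∈ l, x ≤ b) →
    l.foldl max c ≤ b := by
  induction l with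
  | nil => intro c b hc _; simpa
  | cons x t ih =>
    intro c b hc hl
    exact ih (max c x) b (max_le hc (hl x List.mem_cons_self))
      (fun y hy => hl y (List.mem_cons_of_mem x hy))

-- if the running max never moved, neither did the recorded pair
lemma pv_fold_unchanged (qs : List (Int × Int)) (c : Int) (pos : List Int)
    (h : (qs.foldl pvStep (c, pos)).1 = c) : (qs.foldl pvStep (c, pos)).2 = pos := by
  induction qs generalizing c pos with
  | nil => rfl
  | cons p t ih =>
    simp only [List.foldl_cons, pvStep] at h ⊢
    by_cases hc : c < p.1 + p.2
    · exfalso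
      rw [if_pos hc] at h
      have h1 := pv_fold_fst t (p.1 + p.2) [p.1, p.2]
      have h2 := pv_le_foldl_max (pvSums t) (p.1 + p.2)
      omega
    · rw [if_neg hc] at h ⊢
      exact ih c pos h

-- main invariant: once the running max has strictly improved over its start, the recorded
-- pair is the one at the FIRST index where the overall maximum of the sums occurs
lemma pv_fold_snd (qs : List (Int × Int)) (c : Int) (pos : List Int) (k : Nat)
    (hG : c < (pvSums qs).foldl max c)
    (hk : PySem.List.index? (pvSums qs) ((pvSums qs).foldl max c) = some k) :
    (qs.foldl pvStep (c, pos)).2 = [(qs.getD k (0, 0)).1, (qs.getD k (0, 0)).2] := by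
  induction qs generalizing c pos k with
  | nil => simp [pvSums] at hG
  | cons p t ih =>
    have hcons : pvSums (p :: t) = (p.1 + p.2) :: pvSums t := rfl
    rw [hcons] at hk hG
    rw [List.foldl_cons] at hk hG
    by_cases hc : c < p.1 + p.2
    · have hstep : (p :: t).foldl pvStep (c, pos) = t.foldl pvStep (p.1 + p.2, [p.1, p.2]) := by
        simp [pvStep, hc]
      have hmc : max c (p.1 + p.2) = p.1 + p.2 := max_eq_right (le_of_lt hc)
      rw [hmc] at hk hG
      by_cases hsG : p.1 + p.2 < (pvSums t).foldl max (p.1 + p.2)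
      · have hne : p.1 + p.2 ≠ (pvSums t).foldl max (p.1 + p.2) := ne_of_lt hsG
        rw [PySem.List.index?_cons_of_ne _ hne] at hk
        rcases Option.map_eq_some_iff.mp hk with ⟨k', hk', rfl⟩
        rw [hstep, ih (p.1 + p.2) [p.1, p.2] k' hsG hk']
        simp
      · have hG' : (pvSums t).foldl max (p.1 + p.2) = p.1 + p.2 :=
          le_antisymm (not_lt.mp hsG) (pv_le_foldl_max _ _)
        rw [hG', PySem.List.index?_cons_self _ _] at hk
        injection hk with hk0
        subst hk0
        rw [hstep, pv_fold_unchanged t _ _ (by rw [pv_fold_fst, hG'])]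
        simp
    · have hstep : (p :: t).foldl pvStep (c, pos) = t.foldl pvStep (c, pos) := by
        simp [pvStep, hc]
      have hmc : max c (p.1 + p.2) = c := max_eq_left (not_lt.mp hc)
      rw [hmc] at hk hG
      have hne : p.1 + p.2 ≠ (pvSums t).foldl max c :=
        ne_of_lt (lt_of_le_of_lt (not_lt.mp hc) hG)
      rw [PySem.List.index?_cons_of_ne _ hne] at hk
      rcases Option.map_eq_some_iff.mp hk with ⟨k', hk', rfl⟩
      rw [hstep, ih c pos k' hG hk']
      simp

-- ===== VERDICT (by name: the statement is the Claim_ definition above) =====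
theorem maxCGroup_spec : Claim_equal_maxCGroup := by
  intro array _
  unfold Spec_maxCGroup
  simp only [maxCGroup_alt]
  rw [pv_convA, pv_convSums]
  cases hmq : PySem.List.max? (pvSums (array.zip array.tail)) (fun x => x) with
  | none =>
    have hnil : pvSums (array.zip array.tail) = [] := (PySem.List.max?_eq_none_iff _ _).mp hmq
    have hz : array.zip array.tail = [] := List.map_eq_nil_iff.mp hnil
    rw [hz]
    rfl
  | some m =>
    dsimp only
    by_cases hm : m ≤ 0
    · rw [if_pos hm]
      have hfst : ((array.zip array.tail).foldl pvStep (0, [])).1 = 0 := by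
        rw [pv_fold_fst]
        refine le_antisymm (pv_foldl_max_le _ _ _ le_rfl ?_) (pv_le_foldl_max _ _)
        intro x hx
        have := PySem.List.max?_isMax hmq x hx
        simp only at this
        omega
      exact pv_fold_unchanged _ _ _ hfst
    · rw [if_neg hm]
      rw [not_le] at hm
      have hmem : m ∈ pvSums (array.zip array.tail) := PySem.List.max?_mem hmq
      have hG : (pvSums (array.zip array.tail)).foldl max 0 = m := by
        refine le_antisymm (pv_foldl_max_le _ _ _ (le_of_lt hm) ?_) (pv_mem_le_foldl_max _ _ _ hmem)
        intro x hx
        have := PySem.List.max?_isMax hmq x hx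
        simpa using this
      obtain ⟨k, hk⟩ : ∃ k, PySem.List.index? (pvSums (array.zip array.tail)) m = some k :=
        Option.isSome_iff_exists.mp ((PySem.List.index?_isSome_iff _ _).mpr hmem)
      rw [hk]
      rw [pv_fold_snd (array.zip array.tail) 0 [] k (by rw [hG]; exact hm) (by rw [hG]; exact hk)]
      obtain ⟨hklt, -, -⟩ := PySem.List.getElem_of_index?_eq_some hk
      have hlen : k < array.length - 1 := by
        simp only [pvSums, List.length_map, List.length_zip, List.length_tail] at hklt
        omega
      have hk1 : k < array.length := by omega
      have hk2 : k + 1 < array.length := by omega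
      rw [List.getD_eq_getElem _ _ (by simpa [List.length_zip, List.length_tail] using hlen),
          List.getElem_zip, List.getElem_tail]
      dsimp only
      rw [PySem.List.pyGetD_natCast, pv_getD_succ,
          List.getD_eq_getElem _ _ hk1, List.getD_eq_getElem _ _ hk2]
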